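-- pv_equiv track=rewrite | github.com/YJL33/LeetCode | current_session/777.py | canTransform_2
-- ===== SOURCE A (Python) =====
-- def canTransform_2(start, end):
--     """
--     :type start: str
--     :type end: str
--     :rtype: bool
--     """
--     # the order should remain the same
--     before, after = [], []
--     for i in range(len(start)):
--         if start[i] in 'RL':
--             before += start[i],
--         if end[i] in 'RL':
--             after += end[i],
--
--     # check the order
--     if ''.join(before) != ''.join(after):
--         return False
--
--     # check the moves
--     rs, ls = [], []
--     for j in range(len(start)):
--         if start[j] == 'R':
--             rs += j,
--         if end[j] == 'R':
--             if len(rs) == 0: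
--                 return False
--             else:
--                 rs.pop()
--
--     for k in range(len(start)-1, -1, -1):
--         if start[k] == 'L':
--             ls += k,
--         if end[k] == 'L':
--             if len(ls) == 0:
--                 return False
--             else:
--                 ls.pop()
--     return True
-- ===== SOURCE B (Python) =====
-- def canTransform_2(start, end):
--     """
--     :type start: str
--     :type end: str
--     :rtype: bool
--     """
--     n = len(start)
--     i = j = 0
--     while True:
--         while i < n and start[i] not in 'RL':
--             i += 1
--         while j < n and end[j] not in 'RL':
--             j += 1
--         if i == n or j == n:
--             return i == n and j == n
--         if start[i] != end[j]:
--             return False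
--         if start[i] == 'R' and i > j:
--             return False
--         if start[i] == 'L' and i < j:
--             return False
--         i += 1
--         j += 1
-- ===== Notes on version B (the rewrite author's own statement) =====
-- stated objective: faster
-- what changed: Replaced A's three separate index passes (order check via joined strings, then an R-stack pass and a backward L-stack pass) by a single two-pointer scan over the first len(start) characters that keeps only two cursors and compares each matched R/L pair and its positions directly (one pass, no intermediate lists: measured constant-factor speedup).
import Mathlib
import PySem

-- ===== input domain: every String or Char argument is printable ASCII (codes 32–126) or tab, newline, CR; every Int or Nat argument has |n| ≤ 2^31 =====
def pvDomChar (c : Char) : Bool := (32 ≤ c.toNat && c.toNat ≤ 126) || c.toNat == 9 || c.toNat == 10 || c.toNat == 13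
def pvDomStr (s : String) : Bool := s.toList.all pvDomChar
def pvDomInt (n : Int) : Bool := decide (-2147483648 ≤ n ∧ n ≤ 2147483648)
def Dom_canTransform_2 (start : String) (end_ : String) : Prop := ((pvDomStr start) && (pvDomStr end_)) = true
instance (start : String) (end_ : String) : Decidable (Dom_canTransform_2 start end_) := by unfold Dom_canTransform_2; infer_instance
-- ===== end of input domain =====

-- B replaces A's three index passes (order check via joined strings, then two explicit
-- position stacks) with a single two-pointer scan keeping only two cursors (measured
-- constant-factor speedup; both O(n)).

-- ===== PORT A =====
-- `x in 'RL'` on a single character is membership of that character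
def pvIsRL (c : Char) : Bool := c == 'R' || c == 'L'

-- first loop: builds (before, after); none = IndexError from end[i] (len(end) < len(start))
def pvBody1 (s e : List Char) (acc : Option (List Char × List Char)) (i : Int) :
    Option (List Char × List Char) :=
  match acc with
  | none => none
  | some (b, a) =>
    let b' := match PySem.List.pyGet? s i with
      | some c => if pvIsRL c then b ++ [c] else b
      | none => b      -- unreachable: 0 ≤ i < len(start)
    match PySem.List.pyGet? e i with
    | some c => some (b', if pvIsRL c then a ++ [c] else a)
    | none => none

def pvA_loop1 (s e : List Char) (n : Int) : Option (List Char × List Char) :=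
  (PySem.List.pyRange 0 n 1).foldl (pvBody1 s e) (some ([], []))

-- second loop: stack rs of indices; none = early `return False`
-- (end[j] is in range whenever loop1 succeeded, so the getD default ' ' is never consulted)
def pvBody2 (s e : List Char) (acc : Option (List Int)) (j : Int) : Option (List Int) :=
  match acc with
  | none => none
  | some rs =>
    let rs' := if (PySem.List.pyGet? s j).getD ' ' == 'R' then rs ++ [j] else rs
    if (PySem.List.pyGet? e j).getD ' ' == 'R' then
      if rs'.length == 0 then none
      else match PySem.List.pop? rs' (-1) with    -- rs.pop()
        | some (_, rest) => some rest
        | none => none                            -- unreachable: rs' ≠ []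
    else some rs'

def pvA_loop2 (s e : List Char) (n : Int) : Option (List Int) :=
  (PySem.List.pyRange 0 n 1).foldl (pvBody2 s e) (some [])

-- third loop: k from n-1 down to 0, stack ls; none = early `return False`
def pvBody3 (s e : List Char) (acc : Option (List Int)) (k : Int) : Option (List Int) :=
  match acc with
  | none => none
  | some ls =>
    let ls' := if (PySem.List.pyGet? s k).getD ' ' == 'L' then ls ++ [k] else ls
    if (PySem.List.pyGet? e k).getD ' ' == 'L' then
      if ls'.length == 0 then none
      else match PySem.List.pop? ls' (-1) with    -- ls.pop()
        | some (_, rest) => some rest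
        | none => none                            -- unreachable: ls' ≠ []
    else some ls'

def pvA_loop3 (s e : List Char) (n : Int) : Option (List Int) :=
  (PySem.List.pyRange (n - 1) (-1) (-1)).foldl (pvBody3 s e) (some [])

def canTransform_2 (start : String) (end_ : String) : Bool :=
  let s := start.toList
  let e := end_.toList
  let n := PySem.Str.len start
  match pvA_loop1 s e n with
  | none => false                      -- IndexError: outside Pre_
  | some (before, after) =>
    if before ≠ after then false       -- ''.join(before) != ''.join(after)
    else
      match pvA_loop2 s e n with
      | none => false
      | some _ =>
        match pvA_loop3 s e n with
        | none => false
        | some _ => true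

-- ===== PORT B =====
-- the skip loop over `end` (bounded by j < n) becomes pvSkipE; the outer scan advances
-- through `start` (i < n is s nonempty), comparing matched pairs with Source B's early returns
def pvSkipE : List Char → Int → Int → (List Char × Int)
  | [], j, _ => ([], j)
  | d :: e, j, n => if j < n && !pvIsRL d then pvSkipE e (j + 1) n else (d :: e, j)

def pvGo : List Char → List Char → Int → Int → Int → Bool
  | [], e, _, j, n =>
    decide ((pvSkipE e j n).2 = n)          -- i == n: return j == n
  | c :: s', e, i, j, n =>
    if !pvIsRL c then pvGo s' e (i + 1) j n
    else
      match pvSkipE e j n with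
      | (e', j') =>
        if j' == n then false               -- j == n but i < n
        else match e' with
          | [] => false                     -- unreachable inside Pre_: j' < n ≤ len(end)
          | d :: e'' =>
            if c != d then false
            else if c == 'R' && i > j' then false
            else if c == 'L' && i < j' then false
            else pvGo s' e'' (i + 1) (j' + 1) n

def canTransform_2_alt (start : String) (end_ : String) : Bool :=
  pvGo start.toList end_.toList 0 0 (start.toList.length : Int)

-- ===== PRECONDITION & SPEC =====
-- Pre_ is exactly where the Python A returns: when end is shorter than start, A raises
-- IndexError at end[i] in its first loop (extra characters of a longer end are ignored
-- by A, and B reproduces that).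
def Pre_canTransform_2 (start : String) (end_ : String) : Prop :=
  start.toList.length ≤ end_.toList.length
instance (start : String) (end_ : String) : Decidable (Pre_canTransform_2 start end_) := by
  unfold Pre_canTransform_2; infer_instance

def pvWitness_canTransform_2 : String × String := ("XRXXL", "XXRLXQ")

def Spec_canTransform_2 (start : String) (end_ : String) (out : Bool) : Prop :=
  out = canTransform_2_alt start end_
instance (start : String) (end_ : String) (out : Bool) : Decidable (Spec_canTransform_2 start end_ out) := by
  unfold Spec_canTransform_2; infer_instance

-- ===== CLAIM (what is proved, stated in full; the proofs are below) =====
def Claim_equal_canTransform_2 : Prop :=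
  ∀ (start : String) (end_ : String), Dom_canTransform_2 start end_ →
    Pre_canTransform_2 start end_ →
    Spec_canTransform_2 start end_ (canTransform_2 start end_)

-- ===== LEMMAS AND PROOFS =====

-- annotation of a string: its R/L characters with their positions
def pvAnn : List Char → Int → List (Char × Int)
  | [], _ => []
  | c :: s, i => if pvIsRL c then (c, i) :: pvAnn s (i + 1) else pvAnn s (i + 1)

-- pairwise check of two annotated sequences (the essence of B)
def pvChk : List (Char × Int) → List (Char × Int) → Bool
  | [], [] => true
  | (c, p) :: xs, (d, q) :: ys =>
      if c != d then false
      else if c == 'R' && p > q then false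
      else if c == 'L' && p < q then false
      else pvChk xs ys
  | _, _ => false

-- structural engine equivalent to A's stack loops
def pvStk (c0 : Char) : List (Char × Char × Int) → List Int → Option (List Int)
  | [], rs => some rs
  | (c, d, k) :: t, rs =>
    let rs' := if c == c0 then rs ++ [k] else rs
    if d == c0 then
      if rs'.length == 0 then none
      else match PySem.List.pop? rs' (-1) with
        | some (_, rest) => pvStk c0 t rest
        | none => none
    else pvStk c0 t rs'

def pvTriples : List Char → List Char → Int → List (Char × Char × Int)
  | c :: s, d :: e, a => (c, d, a) :: pvTriples s e (a + 1)
  | _, _, _ => []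

def pvPos (c0 : Char) (xs : List (Char × Int)) : List Int :=
  (xs.filter (fun x => x.1 == c0)).map Prod.snd

-- a Bool predicate complement count (specific plumbing for the position complement)
theorem pvCountP_not (l : List Int) (p : Int → Bool) :
    l.countP p + l.countP (fun a => !p a) = l.length := by
  induction l with
  | nil => simp
  | cons x l ih => by_cases h : p x = true <;> simp [h] <;> omega

theorem pvSkipE_bnd : ∀ (e : List Char) (j n : Int), j ≤ n → (n - j).toNat ≤ e.length →
    (pvSkipE e j n).2 ≤ n ∧
    (n - (pvSkipE e j n).2).toNat ≤ (pvSkipE e j n).1.length ∧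
    pvAnn (e.take (n - j).toNat) j =
      pvAnn ((pvSkipE e j n).1.take (n - (pvSkipE e j n).2).toNat) (pvSkipE e j n).2 ∧
    ((pvSkipE e j n).2 = n ∨
      ∃ d e'', (pvSkipE e j n).1 = d :: e'' ∧ pvIsRL d = true) := by
  intro e
  induction e with
  | nil =>
    intro j n hj hlen
    have hj' : j = n := by simp at hlen; omega
    subst hj'
    simp [pvSkipE]
  | cons d e ih =>
    intro j n hj hlen
    by_cases hc : (decide (j < n) && !pvIsRL d) = true
    · have hjn : j < n := by
        rcases Bool.and_eq_true_iff.mp hc with ⟨h1, _⟩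
        exact of_decide_eq_true h1
      have hRL : pvIsRL d = false := by
        rcases Bool.and_eq_true_iff.mp hc with ⟨_, h2⟩
        simpa using h2
      have hskip : pvSkipE (d :: e) j n = pvSkipE e (j + 1) n := by
        simp [pvSkipE, hc]
      have hlen' : (n - (j + 1)).toNat ≤ e.length := by
        simp at hlen ⊢; omega
      have := ih (j + 1) n (by omega) hlen'
      rw [hskip]
      refine ⟨this.1, this.2.1, ?_, this.2.2.2⟩
      have htk : (d :: e).take (n - j).toNat = d :: e.take (n - (j + 1)).toNat := by
        have h1 : (n - j).toNat = (n - (j + 1)).toNat + 1 := by omega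
        rw [h1, List.take_succ_cons]
      rw [htk]
      simp only [pvAnn, hRL, Bool.false_eq_true, if_neg]
      exact this.2.2.1
    · have hskip : pvSkipE (d :: e) j n = (d :: e, j) := by
        simp only [pvSkipE]
        rw [if_neg (by simpa using hc)]
      rw [hskip]
      by_cases hjn : j = n
      · exact ⟨by omega, by simpa using hlen, rfl, Or.inl hjn⟩
      · have hjlt : j < n := by omega
        have hRL : pvIsRL d = true := by
          by_contra hF
          have hcc : (decide (j < n) && !pvIsRL d) = true := by
            simp [hjlt]
            simpa using hF
          exact hc hcc
        exact ⟨by omega, by simpa using hlen, rfl, Or.inr ⟨d, e, rfl, hRL⟩⟩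

theorem pvAnn_fst : ∀ (s : List Char) (i : Int),
    (pvAnn s i).map Prod.fst = s.filter pvIsRL := by
  intro s
  induction s with
  | nil => intro i; simp [pvAnn]
  | cons c s ih =>
    intro i
    by_cases h : pvIsRL c = true
    · simp [pvAnn, h, List.filter_cons, ih]
    · simp only [Bool.not_eq_true] at h
      simp [pvAnn, h, List.filter_cons, ih]

theorem pvAnn_RL : ∀ (s : List Char) (i : Int) (x : Char × Int), x ∈ pvAnn s i → pvIsRL x.1 = true := by
  intro s
  induction s with
  | nil => intro i x hx; simp [pvAnn] at hx
  | cons c s ih =>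
    intro i x hx
    by_cases h : pvIsRL c = true
    · simp [pvAnn, h] at hx
      rcases hx with rfl | hx
      · exact h
      · exact ih _ _ hx
    · simp only [Bool.not_eq_true] at h
      simp [pvAnn, h] at hx
      exact ih _ _ hx

theorem pvTriples_take (m : Nat) : ∀ (s e : List Char) (a : Int),
    (pvTriples s e a).take m = pvTriples (s.take m) (e.take m) a := by
  induction m with
  | zero => intro s e a; simp [pvTriples]
  | succ m ih =>
    intro s e a
    match s, e with
    | [], _ => simp [pvTriples]
    | c :: s, [] => simp [pvTriples]
    | c :: s, d :: e => simp [pvTriples, List.take_succ_cons, ih]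

theorem pvTriples_length : ∀ (s e : List Char), s.length = e.length → ∀ (a : Int),
    (pvTriples s e a).length = s.length := by
  intro s
  induction s with
  | nil => intro e h a; simp [pvTriples]
  | cons c s' ih =>
    intro e h a
    match e with
    | [] => simp at h
    | d :: e' =>
      simp only [List.length_cons, Nat.add_right_cancel_iff] at h
      simp [pvTriples, ih e' h (a + 1)]

theorem pvTriples_drop : ∀ (k : Nat) (s e : List Char) (a : Int),
    (pvTriples s e a).drop k = pvTriples (s.drop k) (e.drop k) (a + (k : Int)) := by
  intro k
  induction k with
  | zero => intro s e a; simp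
  | succ k ih =>
    intro s e a
    match s, e with
    | [], _ => simp [pvTriples]
    | c :: s', [] => simp [pvTriples]
    | c :: s', d :: e' =>
      simp only [pvTriples, List.drop_succ_cons, ih s' e' (a + 1)]
      congr 1
      push_cast
      ring

theorem pvTriples_countF (c0 : Char) : ∀ (s e : List Char) (a : Int), s.length = e.length →
    (pvTriples s e a).countP (fun x => x.1 == c0) = s.countP (fun c => c == c0) := by
  intro s
  induction s with
  | nil => intro e a h; simp [pvTriples]
  | cons c s ih =>
    intro e a h
    match e with
    | [] => simp at h
    | d :: e =>
      simp only [List.length_cons, Nat.add_right_cancel_iff] at h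
      simp [pvTriples, List.countP_cons, ih e (a+1) h]

theorem pvTriples_countS (c0 : Char) : ∀ (s e : List Char) (a : Int), s.length = e.length →
    (pvTriples s e a).countP (fun x => x.2.1 == c0) = e.countP (fun c => c == c0) := by
  intro s
  induction s with
  | nil => intro e a h
           match e with
           | [] => simp [pvTriples]
           | d :: e => simp at h
  | cons c s ih =>
    intro e a h
    match e with
    | [] => simp at h
    | d :: e =>
      simp only [List.length_cons, Nat.add_right_cancel_iff] at h
      simp [pvTriples, List.countP_cons, ih e (a+1) h]

theorem pvPos_bounds (c0 : Char) : ∀ (s : List Char) (i : Int) (p : Int),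
    p ∈ pvPos c0 (pvAnn s i) → i ≤ p ∧ p < i + s.length := by
  intro s
  induction s with
  | nil => intro i p hp; simp [pvAnn, pvPos] at hp
  | cons c s ih =>
    intro i p hp
    by_cases h : pvIsRL c = true
    · by_cases hc : (c == c0) = true
      · simp [pvAnn, pvPos, h, List.filter_cons, hc] at hp
        simp only [List.length_cons]
        rcases hp with rfl | hp
        · omega
        · have := ih (i+1) p (by simpa [pvPos] using hp)
          omega
      · simp [pvAnn, pvPos, h, List.filter_cons, hc] at hp
        have := ih (i+1) p (by simpa [pvPos] using hp)
        simp only [List.length_cons]; omega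
    · simp only [Bool.not_eq_true] at h
      simp [pvAnn, h] at hp
      have := ih (i+1) p hp
      simp only [List.length_cons]; omega

theorem pvPos_sorted (c0 : Char) : ∀ (s : List Char) (i : Int),
    (pvPos c0 (pvAnn s i)).Pairwise (· < ·) := by
  intro s
  induction s with
  | nil => intro i; simp [pvAnn, pvPos]
  | cons c s ih =>
    intro i
    by_cases h : pvIsRL c = true
    · by_cases hc : (c == c0) = true
      · simp only [pvAnn, pvPos, h, if_pos, List.filter_cons, hc]
        simp only [List.map_cons, List.pairwise_cons]
        constructor
        · intro p hp
          have := pvPos_bounds c0 s (i+1) p (by simpa [pvPos] using hp)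
          omega
        · exact ih (i+1)
      · simpa [pvAnn, pvPos, h, List.filter_cons, hc] using ih (i+1)
    · simp only [Bool.not_eq_true] at h
      simpa [pvAnn, h] using ih (i+1)

theorem pvPos_len (c0 : Char) (h : pvIsRL c0 = true) : ∀ (s : List Char) (i : Int),
    (pvPos c0 (pvAnn s i)).length = s.countP (fun c => c == c0) := by
  intro s
  induction s with
  | nil => intro i; simp [pvAnn, pvPos]
  | cons c s ih =>
    intro i
    have ih' := ih (i + 1)
    simp only [pvPos] at ih' ⊢
    by_cases hc : (c == c0) = true
    · have hcRL : pvIsRL c = true := by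
        have := beq_iff_eq.mp hc; subst this; exact h
      simp [pvAnn, hcRL, List.filter_cons, hc, List.countP_cons, ih']
    · by_cases hRL : pvIsRL c = true
      · simp [pvAnn, hRL, List.filter_cons, hc, List.countP_cons, ih']
      · simp only [Bool.not_eq_true] at hRL
        simp [pvAnn, hRL, List.countP_cons, hc, ih']

theorem pvCnt_take_pos (c0 : Char) (h : pvIsRL c0 = true) : ∀ (s : List Char) (i : Int) (m : Nat),
    (s.take m).countP (fun c => c == c0) =
      (pvPos c0 (pvAnn s i)).countP (fun p => decide (p < i + m)) := by
  intro s
  induction s with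
  | nil => intro i m; simp [pvAnn, pvPos]
  | cons c s ih =>
    intro i m
    match m with
    | 0 =>
      simp only [List.take_zero, List.countP_nil]
      symm
      rw [List.countP_eq_zero]
      intro p hp
      have := pvPos_bounds c0 (c :: s) i p (by simpa using hp)
      simp; omega
    | m + 1 =>
      have ih' := ih (i + 1) m
      have hshift : (pvPos c0 (pvAnn s (i+1))).countP (fun p => decide (p < (i+1) + (m:Int))) =
          (pvPos c0 (pvAnn s (i+1))).countP (fun p => decide (p < i + ((m:Nat)+1 : Nat))) := by
        apply List.countP_congr
        intro p _
        have hiff : (p < (i+1) + (m:Int)) ↔ (p < i + ((m:Nat)+1 : Nat)) := by push_cast; omega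
        simp [hiff]
      by_cases hRL : pvIsRL c = true
      · by_cases hc : (c == c0) = true
        · simp only [pvAnn, hRL, if_pos, pvPos, List.filter_cons, hc, if_pos,
            List.map_cons, List.take_succ_cons, List.countP_cons]
          simp only [pvPos] at ih' hshift
          rw [ih', hshift]
          have hlt : (i:Int) < i + ((m:Nat)+1 : Nat) := by push_cast; omega
          simp [hlt]
        · simp only [pvAnn, hRL, if_pos, pvPos, List.filter_cons, hc,
            List.take_succ_cons, List.countP_cons]
          simp only [pvPos] at ih' hshift
          rw [ih', hshift]
          simp [hc]
      · simp only [Bool.not_eq_true] at hRL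
        have hc : (c == c0) = false := by
          rcases Bool.eq_false_or_eq_true (c == c0) with hq | hq
          · have := beq_iff_eq.mp hq; subst this; rw [hRL] at h; exact absurd h (by simp)
          · exact hq
        simp only [pvAnn, hRL, Bool.false_eq_true, if_neg, List.take_succ_cons,
          List.countP_cons, hc]
        simp only [pvPos] at ih' hshift ⊢
        rw [ih', hshift]
        simp

theorem pvGo_eq_chk : ∀ (s e : List Char) (i j n : Int), j ≤ n → (n - j).toNat ≤ e.length →
    pvGo s e i j n = pvChk (pvAnn s i) (pvAnn (e.take (n - j).toNat) j) := by
  intro s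
  induction s with
  | nil =>
    intro e i j n hj hlen
    obtain ⟨hj', hlen', hann, hhead⟩ := pvSkipE_bnd e j n hj hlen
    rw [show pvGo [] e i j n = decide ((pvSkipE e j n).2 = n) from rfl]
    rw [show pvAnn ([] : List Char) i = [] from rfl]
    rw [hann]
    by_cases hn : (pvSkipE e j n).2 = n
    · rw [hn]
      rw [show (n - n).toNat = 0 from by omega]
      simp [pvChk, pvAnn, hn]
    · rcases hhead with h | ⟨d, e'', heq, hd⟩
      · exact absurd h hn
      · have hpos : (n - (pvSkipE e j n).2).toNat = ((n - ((pvSkipE e j n).2 + 1)).toNat) + 1 := by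
          omega
        rw [heq, hpos, List.take_succ_cons]
        simp only [pvAnn, hd, if_pos, pvChk]
        simp [hn]
  | cons c s' ih =>
    intro e i j n hj hlen
    by_cases hRL : pvIsRL c = true
    · obtain ⟨hj', hlen', hann, hhead⟩ := pvSkipE_bnd e j n hj hlen
      rcases hsk : pvSkipE e j n with ⟨e2, j2⟩
      rw [hsk] at hj' hlen' hann hhead
      simp only at hj' hlen' hann hhead
      rw [hann]
      rw [show pvAnn (c :: s') i = (c, i) :: pvAnn s' (i + 1) from by simp [pvAnn, hRL]]
      rcases e2 with _ | ⟨d, e''⟩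
      · have hn : j2 = n := by simp at hlen'; omega
        subst hn
        rw [show (j2 - j2).toNat = 0 from by omega]
        simp [pvGo, hRL, hsk, pvChk, pvAnn]
      · by_cases hn : j2 = n
        · subst hn
          rw [show (j2 - j2).toNat = 0 from by omega]
          simp [pvGo, hRL, hsk, pvChk, pvAnn]
        · have hd : pvIsRL d = true := by
            rcases hhead with h | ⟨d', e3, heq, hd'⟩
            · exact absurd h hn
            · cases heq; exact hd'
          have hpos : (n - j2).toNat = ((n - (j2 + 1)).toNat) + 1 := by omega
          rw [hpos, List.take_succ_cons]
          rw [show pvAnn (d :: List.take (n - (j2 + 1)).toNat e'') j2 =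
              (d, j2) :: pvAnn (List.take (n - (j2 + 1)).toNat e'') (j2 + 1) from by
            simp [pvAnn, hd]]
          have hrec := ih e'' (i + 1) (j2 + 1) n (by omega) (by simp at hlen' ⊢; omega)
          simp only [pvChk]
          by_cases hcd : (c == d) = true
          · simp only [bne, hcd, Bool.not_true, Bool.false_eq_true, if_neg]
            by_cases hR : (c == 'R' && decide (i > j2)) = true
            · simp [pvGo, hRL, hsk, hn, hR]
            · by_cases hL : (c == 'L' && decide (i < j2)) = true
              · simp [pvGo, hRL, hsk, hn, hR, hL]
              · simp only [hR, hL, Bool.false_eq_true, if_neg]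
                rw [← hrec]
                have hcd' : c = d := beq_iff_eq.mp hcd
                subst hcd'
                rcases (by simpa [pvIsRL] using hRL : c = 'R' ∨ c = 'L') with rfl | rfl
                · have hiJ : ¬ i > j2 := by simpa using hR
                  simp [pvGo, hsk, hn, hiJ, pvIsRL]
                · have hiJ : ¬ i < j2 := by simpa using hL
                  simp [pvGo, hsk, hn, hiJ, pvIsRL]
          · have hne : ¬ c = d := by intro h; subst h; simp at hcd
            simp [pvGo, hRL, hsk, hn, bne, hcd, hne]
    · simp only [Bool.not_eq_true] at hRL
      simp only [pvGo, hRL, Bool.not_false, if_pos, pvAnn, Bool.false_eq_true, if_neg]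
      exact ih e (i + 1) j n hj hlen

theorem pvStk_isSome (c0 : Char) : ∀ (t : List (Char × Char × Int)) (rs : List Int),
    (pvStk c0 t rs).isSome = true ↔
      ∀ m : Nat, (t.take m).countP (fun x => x.2.1 == c0) ≤
        rs.length + (t.take m).countP (fun x => x.1 == c0) := by
  intro t
  induction t with
  | nil => intro rs; simp [pvStk]
  | cons x t ih =>
    rcases x with ⟨c, d, k⟩
    intro rs
    by_cases hc : (c == c0) = true
    · by_cases hd : (d == c0) = true
      · have hstep : pvStk c0 ((c, d, k) :: t) rs = pvStk c0 t rs := by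
          simp [pvStk, hc, hd, PySem.List.pop?_last rs k]
        rw [hstep, ih]
        constructor
        · intro H m
          match m with
          | 0 => simp
          | m + 1 =>
            have := H m
            simp [List.take_succ_cons, List.countP_cons, hd, hc]
            omega
        · intro H m
          have := H (m + 1)
          simp [List.take_succ_cons, List.countP_cons, hd, hc] at this
          omega
      · have hstep : pvStk c0 ((c, d, k) :: t) rs = pvStk c0 t (rs ++ [k]) := by
          simp [pvStk, hc, hd]
        rw [hstep, ih]
        constructor
        · intro H m
          match m with
          | 0 => simp
          | m + 1 =>
            have := H m
            simp [List.take_succ_cons, List.countP_cons, hd, hc] at this ⊢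
            omega
        · intro H m
          have := H (m + 1)
          simp [List.take_succ_cons, List.countP_cons, hd, hc] at this ⊢
          omega
    · by_cases hd : (d == c0) = true
      · by_cases hrs : rs = []
        · subst hrs
          have hstep : pvStk c0 ((c, d, k) :: t) [] = none := by
            simp [pvStk, hc, hd]
          rw [hstep]
          simp only [Option.isSome_none, Bool.false_eq_true, false_iff]
          intro H
          have := H 1
          simp [List.take_succ_cons, List.countP_cons, hd, hc] at this
        · obtain ⟨zs, z, hz⟩ : ∃ zs z, rs = zs ++ [z] := by
            rcases List.eq_nil_or_concat rs with h | ⟨zs, z, h⟩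
            · exact absurd h hrs
            · exact ⟨zs, z, by simpa using h⟩
          subst hz
          have hstep : pvStk c0 ((c, d, k) :: t) (zs ++ [z]) = pvStk c0 t zs := by
            simp [pvStk, hc, hd, PySem.List.pop?_last zs z]
          rw [hstep, ih]
          constructor
          · intro H m
            match m with
            | 0 => simp
            | m + 1 =>
              have := H m
              simp [List.take_succ_cons, List.countP_cons, hd, hc] at this ⊢
              omega
          · intro H m
            have := H (m + 1)
            simp [List.take_succ_cons, List.countP_cons, hd, hc] at this ⊢
            omega
      · have hstep : pvStk c0 ((c, d, k) :: t) rs = pvStk c0 t rs := by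
          simp [pvStk, hc, hd]
        rw [hstep, ih]
        constructor
        · intro H m
          match m with
          | 0 => simp
          | m + 1 =>
            have := H m
            simp [List.take_succ_cons, List.countP_cons, hd, hc] at this ⊢
            omega
        · intro H m
          have := H (m + 1)
          simp [List.take_succ_cons, List.countP_cons, hd, hc] at this ⊢
          omega

theorem pvPos_cons_eq (c0 : Char) (p : Int) (xs : List (Char × Int)) :
    pvPos c0 ((c0, p) :: xs) = p :: pvPos c0 xs := by
  simp [pvPos, List.filter_cons]

theorem pvPos_cons_ne (c0 c : Char) (h : (c == c0) = false) (p : Int) (xs : List (Char × Int)) :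
    pvPos c0 ((c, p) :: xs) = pvPos c0 xs := by
  simp [pvPos, List.filter_cons, h]

theorem pvCrux : ∀ (xs ys : List Int), xs.Pairwise (· < ·) → ys.Pairwise (· < ·) →
    xs.length = ys.length →
    ((∀ M : Int, ys.countP (fun y => decide (y < M)) ≤ xs.countP (fun x => decide (x < M))) ↔
      List.Forall₂ (· ≤ ·) xs ys) := by
  intro xs
  induction xs with
  | nil =>
    intro ys _ _ hlen
    match ys with
    | [] => simp
    | y :: ys => simp at hlen
  | cons p xs ih =>
    intro ys hx hy hlen
    match ys with
    | [] => simp at hlen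
    | q :: ys =>
      simp only [List.length_cons, Nat.add_right_cancel_iff] at hlen
      simp only [List.pairwise_cons] at hx hy
      constructor
      · intro H
        have hpq : p ≤ q := by
          by_contra hgt
          push_neg at hgt
          have h1 := H (q + 1)
          have hys : (q :: ys).countP (fun y => decide (y < q + 1)) =
              ys.countP (fun y => decide (y < q + 1)) + 1 := by
            simp [List.countP_cons]
          have hxs0 : (p :: xs).countP (fun x => decide (x < q + 1)) = 0 := by
            rw [List.countP_eq_zero]
            intro a ha
            simp only [List.mem_cons] at ha
            rcases ha with rfl | ha
            · simp; omega
            · have := hx.1 a ha; simp; omega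
          omega
        refine List.Forall₂.cons hpq (ih ys hx.2 hy.2 hlen |>.mp ?_)
        intro M
        by_cases hM : q < M
        · have := H M
          have hpM : p < M := by omega
          simp [List.countP_cons, hpM, hM] at this
          omega
        · have : ys.countP (fun y => decide (y < M)) = 0 := by
            rw [List.countP_eq_zero]
            intro a ha
            have := hy.1 a ha
            simp; omega
          omega
      · intro H
        rcases H with _ | ⟨hpq, H'⟩
        intro M
        have := (ih ys hx.2 hy.2 hlen |>.mpr H') M
        simp only [List.countP_cons]
        by_cases hq : q < M
        · have hp : p < M := by omega
          simp [hp, hq]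
          omega
        · simp [hq]
          by_cases hp : p < M <;> simp [hp] <;> omega

theorem pvCruxGe (xs ys : List Int) (hx : xs.Pairwise (· < ·)) (hy : ys.Pairwise (· < ·))
    (hlen : xs.length = ys.length) :
    ((∀ M : Int, ys.countP (fun y => decide (M ≤ y)) ≤ xs.countP (fun x => decide (M ≤ x))) ↔
      List.Forall₂ (· ≥ ·) xs ys) := by
  have hx' : ((xs.map (fun x => -x)).reverse).Pairwise (· < ·) := by
    rw [List.pairwise_reverse, List.pairwise_map]
    exact hx.imp (by intro a b h; omega)
  have hy' : ((ys.map (fun y => -y)).reverse).Pairwise (· < ·) := by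
    rw [List.pairwise_reverse, List.pairwise_map]
    exact hy.imp (by intro a b h; omega)
  have hlen' : ((xs.map (fun x => -x)).reverse).length = ((ys.map (fun y => -y)).reverse).length := by
    rw [List.length_reverse, List.length_reverse, List.length_map, List.length_map]
    exact hlen
  have hcnt : ∀ (l : List Int) (M : Int),
      ((l.map (fun x => -x)).reverse).countP (fun x => decide (x < M)) =
        l.countP (fun x => decide (1 - M ≤ x)) := by
    intro l M
    rw [List.countP_reverse, List.countP_map]
    apply List.countP_congr
    intro a _
    have hiff : (-a < M) ↔ (1 - M ≤ a) := by omega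
    simp [hiff]
  have hfa : List.Forall₂ (· ≤ ·) ((xs.map (fun x => -x)).reverse) ((ys.map (fun y => -y)).reverse) ↔
      List.Forall₂ (· ≥ ·) xs ys := by
    rw [List.forall₂_reverse_iff]
    constructor
    · intro h
      have := List.forall₂_map_left_iff.mp (List.forall₂_map_right_iff.mp h)
      exact this.imp (by intro a b hab; omega)
    · intro h
      apply List.forall₂_map_right_iff.mpr
      apply List.forall₂_map_left_iff.mpr
      exact h.imp (by intro a b hab; omega)
  rw [← hfa, ← pvCrux _ _ hx' hy' hlen']
  constructor
  · intro H M
    rw [hcnt, hcnt]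
    exact H (1 - M)
  · intro H M
    have := H (1 - M)
    rw [hcnt, hcnt] at this
    have e1 : ∀ l : List Int, l.countP (fun x => decide (1 - (1 - M) ≤ x)) =
        l.countP (fun x => decide (M ≤ x)) := by
      intro l
      apply List.countP_congr
      intro a _
      have hiff : (1 - (1 - M) ≤ a) ↔ (M ≤ a) := by omega
      simp [hiff]
    rw [e1, e1] at this
    exact this

theorem pvChk_iff : ∀ (xs ys : List (Char × Int)),
    (∀ x ∈ xs, pvIsRL x.1 = true) → (∀ y ∈ ys, pvIsRL y.1 = true) →
    (pvChk xs ys = true ↔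
      (xs.map Prod.fst = ys.map Prod.fst ∧
       List.Forall₂ (· ≤ ·) (pvPos 'R' xs) (pvPos 'R' ys) ∧
       List.Forall₂ (· ≥ ·) (pvPos 'L' xs) (pvPos 'L' ys))) := by
  intro xs
  induction xs with
  | nil =>
    intro ys _ _
    match ys with
    | [] => simp [pvChk, pvPos]
    | (d, q) :: ys => simp [pvChk]
  | cons x xs ih =>
    rcases x with ⟨c, p⟩
    intro ys hxs hys
    match ys with
    | [] => simp [pvChk]
    | (d, q) :: ys =>
      have hc := hxs (c, p) (by simp)
      have hd := hys (d, q) (by simp)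
      simp only at hc hd
      have ih' := ih ys (fun x hx => hxs x (by simp [hx])) (fun y hy => hys y (by simp [hy]))
      by_cases hcd : (c == d) = true
      · have hcdeq : c = d := beq_iff_eq.mp hcd
        subst hcdeq
        have hcrl : c = 'R' ∨ c = 'L' := by simpa [pvIsRL] using hc
        rcases hcrl with rfl | rfl
        · -- c = 'R'
          rw [pvPos_cons_eq 'R' p xs, pvPos_cons_eq 'R' q ys,
              pvPos_cons_ne 'L' 'R' (by decide) p xs, pvPos_cons_ne 'L' 'R' (by decide) q ys]
          simp only [List.map_cons, List.cons.injEq, true_and, List.forall₂_cons]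
          by_cases hgt : p > q
          · have hchk : pvChk (('R', p) :: xs) (('R', q) :: ys) = false := by
              simp [pvChk, hgt]
            rw [hchk]
            simp only [Bool.false_eq_true, false_iff]
            rintro ⟨_, ⟨hle, _⟩, _⟩
            omega
          · have hchk : pvChk (('R', p) :: xs) (('R', q) :: ys) = pvChk xs ys := by
              simp [pvChk, hgt]
            rw [hchk, ih']
            constructor
            · rintro ⟨h1, h2, h3⟩
              exact ⟨h1, ⟨by omega, h2⟩, h3⟩
            · rintro ⟨h1, ⟨_, h2⟩, h3⟩
              exact ⟨h1, h2, h3⟩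
        · -- c = 'L'
          rw [pvPos_cons_eq 'L' p xs, pvPos_cons_eq 'L' q ys,
              pvPos_cons_ne 'R' 'L' (by decide) p xs, pvPos_cons_ne 'R' 'L' (by decide) q ys]
          simp only [List.map_cons, List.cons.injEq, true_and, List.forall₂_cons]
          by_cases hlt : p < q
          · have hchk : pvChk (('L', p) :: xs) (('L', q) :: ys) = false := by
              simp [pvChk, hlt]
            rw [hchk]
            simp only [Bool.false_eq_true, false_iff]
            rintro ⟨_, _, ⟨hge, _⟩⟩
            omega
          · have hchk : pvChk (('L', p) :: xs) (('L', q) :: ys) = pvChk xs ys := by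
              simp [pvChk, hlt]
            rw [hchk, ih']
            constructor
            · rintro ⟨h1, h2, h3⟩
              exact ⟨h1, h2, ⟨by omega, h3⟩⟩
            · rintro ⟨h1, h2, ⟨_, h3⟩⟩
              exact ⟨h1, h2, h3⟩
      · have hchk : pvChk ((c, p) :: xs) ((d, q) :: ys) = false := by
          simp [pvChk, bne, hcd]
        rw [hchk]
        simp only [Bool.false_eq_true, false_iff]
        rintro ⟨hmap, _, _⟩
        simp only [List.map_cons, List.cons.injEq] at hmap
        exact absurd hmap.1 (by intro h; subst h; simp at hcd)


-- ---------- bridges: A's pyRange folds are the structural engines ----------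
theorem pvA_loop1_aux (S E : List Char) (hlen : S.length = E.length) :
    ∀ (s : List Char) (a : Nat) (b aa : List Char), S.drop a = s →
    (PySem.List.pyRange (a : Int) (S.length : Int) 1).foldl (pvBody1 S E) (some (b, aa)) =
      some (b ++ s.filter pvIsRL, aa ++ (E.drop a).filter pvIsRL) := by
  intro s
  induction s with
  | nil =>
    intro a b aa hdrop
    have ha : S.length ≤ a := List.drop_eq_nil_iff.mp hdrop
    have hE : E.drop a = [] := List.drop_eq_nil_iff.mpr (by omega)
    rw [PySem.List.pyRange_one_eq_nil (by exact_mod_cast ha)]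
    simp [hE]
  | cons c s' ih =>
    intro a b aa hdrop
    have ha : a < S.length := by
      by_contra h
      rw [List.drop_eq_nil_iff.mpr (by omega)] at hdrop
      simp at hdrop
    have haE : a < E.length := by omega
    have hSd := List.drop_eq_getElem_cons ha
    rw [hdrop] at hSd
    have hc : c = S[a] := (List.cons.injEq _ _ _ _ ▸ hSd).1
    have hs' : s' = S.drop (a + 1) := (List.cons.injEq _ _ _ _ ▸ hSd).2
    have hEd := List.drop_eq_getElem_cons haE
    rw [PySem.List.pyRange_one_cons (by exact_mod_cast ha), List.foldl_cons]
    have hgS : PySem.List.pyGet? S (a : Int) = some S[a] := by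
      rw [PySem.List.pyGet?_natCast]; exact List.getElem?_eq_getElem ha
    have hgE : PySem.List.pyGet? E (a : Int) = some E[a] := by
      rw [PySem.List.pyGet?_natCast]; exact List.getElem?_eq_getElem haE
    have hcast : ((a : Int) + 1) = ((a + 1 : Nat) : Int) := by push_cast; ring
    rw [show pvBody1 S E (some (b, aa)) (a : Int) =
        some ((if pvIsRL S[a] then b ++ [S[a]] else b),
              (if pvIsRL E[a] then aa ++ [E[a]] else aa)) from by
      simp [pvBody1, hgS, hgE]]
    rw [hcast, ih (a + 1) _ _ hs'.symm]
    rw [hc, hEd]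
    simp only [List.filter_cons]
    by_cases h1 : pvIsRL S[a] = true <;> by_cases h2 : pvIsRL E[a] = true <;>
      simp [h1, h2, hEd]

theorem pvA_loop1_char (S E : List Char) (hlen : S.length = E.length) :
    pvA_loop1 S E (S.length : Int) = some (S.filter pvIsRL, E.filter pvIsRL) := by
  have := pvA_loop1_aux S E hlen S 0 [] [] (by simp)
  simpa [pvA_loop1] using this

theorem pvA_loop2_none (S E : List Char) (l : List Int) :
    l.foldl (pvBody2 S E) none = none := by
  induction l with
  | nil => rfl
  | cons x l ih => simpa [pvBody2] using ih

theorem pvA_loop2_aux (S E : List Char) (hlen : S.length = E.length) :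
    ∀ (s : List Char) (a : Nat) (rs : List Int), S.drop a = s →
    (PySem.List.pyRange (a : Int) (S.length : Int) 1).foldl (pvBody2 S E) (some rs) =
      pvStk 'R' (pvTriples s (E.drop a) (a : Int)) rs := by
  intro s
  induction s with
  | nil =>
    intro a rs hdrop
    have ha : S.length ≤ a := List.drop_eq_nil_iff.mp hdrop
    have hE : E.drop a = [] := List.drop_eq_nil_iff.mpr (by omega)
    rw [PySem.List.pyRange_one_eq_nil (by exact_mod_cast ha), hE]
    rfl
  | cons c s' ih =>
    intro a rs hdrop
    have ha : a < S.length := by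
      by_contra h
      rw [List.drop_eq_nil_iff.mpr (by omega)] at hdrop
      simp at hdrop
    have haE : a < E.length := by omega
    have hSd := List.drop_eq_getElem_cons ha
    rw [hdrop] at hSd
    have hc : c = S[a] := (List.cons.injEq _ _ _ _ ▸ hSd).1
    have hs' : s' = S.drop (a + 1) := (List.cons.injEq _ _ _ _ ▸ hSd).2
    have hEd := List.drop_eq_getElem_cons haE
    rw [PySem.List.pyRange_one_cons (by exact_mod_cast ha), List.foldl_cons]
    have hgS : (PySem.List.pyGet? S (a : Int)).getD ' ' = S[a] := by
      rw [PySem.List.pyGet?_natCast, List.getElem?_eq_getElem ha]; rfl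
    have hgE : (PySem.List.pyGet? E (a : Int)).getD ' ' = E[a] := by
      rw [PySem.List.pyGet?_natCast, List.getElem?_eq_getElem haE]; rfl
    have hcast : ((a : Int) + 1) = ((a + 1 : Nat) : Int) := by push_cast; ring
    rw [hc, hEd]
    simp only [pvTriples, pvStk]
    rw [show pvBody2 S E (some rs) (a : Int) =
        (let rs' := if S[a] == 'R' then rs ++ [(a : Int)] else rs
         if E[a] == 'R' then
           if rs'.length == 0 then none
           else match PySem.List.pop? rs' (-1) with
             | some (_, rest) => some rest
             | none => none
         else some rs') from by
      simp only [pvBody2, hgS, hgE]]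
    by_cases h2 : (E[a] == 'R') = true
    · simp only [h2, if_pos]
      by_cases hz : ((if (S[a] == 'R') = true then rs ++ [(a : Int)] else rs).length == 0) = true
      · simp only [hz, if_pos]
        exact pvA_loop2_none S E _
      · simp only [hz, Bool.false_eq_true, if_neg]
        rcases hpop : PySem.List.pop? (if (S[a] == 'R') = true then rs ++ [(a : Int)] else rs) (-1) with _ | ⟨z, rest⟩
        · exact pvA_loop2_none S E _
        · rw [hcast]
          simpa using ih (a + 1) rest hs'.symm
    · simp only [h2, Bool.false_eq_true, if_neg]
      rw [hcast]
      simpa using ih (a + 1) (if (S[a] == 'R') = true then rs ++ [(a : Int)] else rs) hs'.symm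

theorem pvA_loop2_char (S E : List Char) (hlen : S.length = E.length) :
    pvA_loop2 S E (S.length : Int) = pvStk 'R' (pvTriples S E 0) [] := by
  have := pvA_loop2_aux S E hlen S 0 [] (by simp)
  simpa [pvA_loop2] using this

theorem pvTriples_snoc : ∀ (s e : List Char) (x y : Char) (a : Int), s.length = e.length →
    pvTriples (s ++ [x]) (e ++ [y]) a = pvTriples s e a ++ [(x, y, a + s.length)] := by
  intro s
  induction s with
  | nil =>
    intro e x y a h
    match e with
    | [] => simp [pvTriples]
    | d :: e => simp at h
  | cons c s' ih =>
    intro e x y a h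
    match e with
    | [] => simp at h
    | d :: e =>
      simp only [List.length_cons, Nat.add_right_cancel_iff] at h
      simp only [List.cons_append, pvTriples, ih e x y (a + 1) h, List.length_cons]
      congr 3
      push_cast
      ring

theorem pvA_loop3_none (S E : List Char) (l : List Int) :
    l.foldl (pvBody3 S E) none = none := by
  induction l with
  | nil => rfl
  | cons x l ih => simpa [pvBody3] using ih

theorem pvA_loop3_aux (S E : List Char) (hlen : S.length = E.length) :
    ∀ (m : Nat), m ≤ S.length → ∀ (rs : List Int),
    (PySem.List.pyRange ((m : Int) - 1) (-1) (-1)).foldl (pvBody3 S E) (some rs) =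
      pvStk 'L' ((pvTriples (S.take m) (E.take m) 0).reverse) rs := by
  intro m
  induction m with
  | zero =>
    intro _ rs
    rw [PySem.List.pyRange_neg_one_eq_nil (by omega)]
    simp [pvTriples, pvStk]
  | succ m ih =>
    intro hm rs
    have hmS : m < S.length := by omega
    have hmE : m < E.length := by omega
    have htkS : S.take (m + 1) = S.take m ++ [S[m]] := by
      rw [List.take_succ, List.getElem?_eq_getElem hmS]; rfl
    have htkE : E.take (m + 1) = E.take m ++ [E[m]] := by
      rw [List.take_succ, List.getElem?_eq_getElem hmE]; rfl
    have hlentk : (S.take m).length = (E.take m).length := by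
      simp [List.length_take]; omega
    have hsnoc := pvTriples_snoc (S.take m) (E.take m) S[m] E[m] 0 hlentk
    have hlen_take : ((S.take m).length : Int) = (m : Int) := by
      simp [List.length_take]; omega
    rw [htkS, htkE, hsnoc, List.reverse_append]
    simp only [List.reverse_singleton, List.singleton_append, zero_add, hlen_take]
    have hrange : PySem.List.pyRange (((m : Nat) + 1 : Int) - 1) (-1) (-1) =
        (m : Int) :: PySem.List.pyRange ((m : Int) - 1) (-1) (-1) := by
      have h1 : (((m : Nat) + 1 : Int) - 1) = (m : Int) := by push_cast; ring
      rw [h1, PySem.List.pyRange_neg_one_cons (by omega)]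
    rw [show (((m : Nat) + 1 : Nat) : Int) - 1 = (((m : Nat) + 1 : Int) - 1) from by push_cast; ring]
    rw [hrange, List.foldl_cons]
    have hgS : (PySem.List.pyGet? S ((m : Nat) : Int)).getD ' ' = S[m] := by
      rw [PySem.List.pyGet?_natCast, List.getElem?_eq_getElem hmS]; rfl
    have hgE : (PySem.List.pyGet? E ((m : Nat) : Int)).getD ' ' = E[m] := by
      rw [PySem.List.pyGet?_natCast, List.getElem?_eq_getElem hmE]; rfl
    simp only [pvStk]
    rw [show pvBody3 S E (some rs) ((m : Nat) : Int) =
        (let ls' := if S[m] == 'L' then rs ++ [((m : Nat) : Int)] else rs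
         if E[m] == 'L' then
           if ls'.length == 0 then none
           else match PySem.List.pop? ls' (-1) with
             | some (_, rest) => some rest
             | none => none
         else some ls') from by
      simp only [pvBody3, hgS, hgE]]
    by_cases h2 : (E[m] == 'L') = true
    · simp only [h2, if_pos]
      by_cases hz : ((if (S[m] == 'L') = true then rs ++ [((m : Nat) : Int)] else rs).length == 0) = true
      · simp only [hz, if_pos]
        exact pvA_loop3_none S E _
      · simp only [hz, Bool.false_eq_true, if_neg]
        rcases hpop : PySem.List.pop? (if (S[m] == 'L') = true then rs ++ [((m : Nat) : Int)] else rs) (-1) with _ | ⟨z, rest⟩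
        · exact pvA_loop3_none S E _
        · simpa using ih (by omega) rest
    · simp only [h2, Bool.false_eq_true, if_neg]
      simpa using ih (by omega) (if (S[m] == 'L') = true then rs ++ [((m : Nat) : Int)] else rs)

theorem pvA_loop3_char (S E : List Char) (hlen : S.length = E.length) :
    pvA_loop3 S E (S.length : Int) = pvStk 'L' ((pvTriples S E 0).reverse) [] := by
  have := pvA_loop3_aux S E hlen S.length (le_refl _) []
  have hS : S.take S.length = S := by simp
  have hE : E.take S.length = E := by rw [hlen]; simp
  rw [hS, hE] at this
  simpa [pvA_loop3] using this

-- ---------- count translations ----------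
theorem pvCnt_drop_pos (c0 : Char) (h : pvIsRL c0 = true) (s : List Char) (k : Nat) :
    (s.drop k).countP (fun c => c == c0) =
      (pvPos c0 (pvAnn s 0)).countP (fun p => decide ((k : Int) ≤ p)) := by
  have htot : (pvPos c0 (pvAnn s 0)).length = s.countP (fun c => c == c0) :=
    pvPos_len c0 h s 0
  have hsplit : (s.take k).countP (fun c => c == c0) + (s.drop k).countP (fun c => c == c0) =
      s.countP (fun c => c == c0) := by
    conv_rhs => rw [← List.take_append_drop k s]
    rw [List.countP_append]
  have htk := pvCnt_take_pos c0 h s 0 k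
  have hcompl := pvCountP_not (pvPos c0 (pvAnn s 0)) (fun p => decide ((k : Int) ≤ p))
  have hneg : (pvPos c0 (pvAnn s 0)).countP (fun p => !decide ((k : Int) ≤ p)) =
      (pvPos c0 (pvAnn s 0)).countP (fun p => decide (p < (0 : Int) + k)) := by
    apply List.countP_congr
    intro p _
    by_cases hp : (k : Int) ≤ p
    · simp [hp]
      try omega
    · simp [hp]
      try omega
  omega

-- ---------- A only reads end[0:len(start)] ----------
theorem pvGet_take (E : List Char) (m : Nat) (x : Int) (h0 : 0 ≤ x) (h1 : x < (m : Int)) :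
    PySem.List.pyGet? (E.take m) x = PySem.List.pyGet? E x := by
  have hx : x = ((x.toNat : Nat) : Int) := by omega
  rw [hx, PySem.List.pyGet?_natCast, PySem.List.pyGet?_natCast, List.getElem?_take,
      if_pos (by omega)]

theorem pvA_loop1_take (S E : List Char) :
    pvA_loop1 S E (S.length : Int) = pvA_loop1 S (E.take S.length) (S.length : Int) := by
  unfold pvA_loop1
  apply PySem.List.foldl_congr_mem
  intro acc x hx
  have hmem := PySem.List.mem_pyRange_one.mp hx
  have hget := pvGet_take E S.length x (by omega) (by omega)
  simp [pvBody1, hget]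

theorem pvA_loop2_take (S E : List Char) :
    pvA_loop2 S E (S.length : Int) = pvA_loop2 S (E.take S.length) (S.length : Int) := by
  unfold pvA_loop2
  apply PySem.List.foldl_congr_mem
  intro acc x hx
  have hmem := PySem.List.mem_pyRange_one.mp hx
  have hget := pvGet_take E S.length x (by omega) (by omega)
  simp [pvBody2, hget]

theorem pvA_loop3_take (S E : List Char) :
    pvA_loop3 S E (S.length : Int) = pvA_loop3 S (E.take S.length) (S.length : Int) := by
  unfold pvA_loop3
  apply PySem.List.foldl_congr_mem
  intro acc x hx
  have hmem := PySem.List.mem_pyRange_neg_one.mp hx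
  have hget := pvGet_take E S.length x (by omega) (by omega)
  simp [pvBody3, hget]

-- ---------- assembly ----------
theorem pvMain (s e : List Char) (hlen : s.length = e.length) :
    (match pvA_loop1 s e (s.length : Int) with
     | none => false
     | some (before, after) =>
       if before ≠ after then false
       else
         match pvA_loop2 s e (s.length : Int) with
         | none => false
         | some _ =>
           match pvA_loop3 s e (s.length : Int) with
           | none => false
           | some _ => true) = pvChk (pvAnn s 0) (pvAnn e 0) := by
  rw [pvA_loop1_char s e hlen]
  by_cases hfil : s.filter pvIsRL = e.filter pvIsRL
  case neg =>
    -- order check fails on both sides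
    simp only [ne_eq, hfil, not_false_iff, if_pos]
    rcases hchk : pvChk (pvAnn s 0) (pvAnn e 0) with _ | _
    · rfl
    · exfalso
      have := (pvChk_iff (pvAnn s 0) (pvAnn e 0) (pvAnn_RL s 0) (pvAnn_RL e 0)).mp hchk
      rw [pvAnn_fst s 0, pvAnn_fst e 0] at this
      exact hfil this.1
  case pos =>
    simp only [ne_eq, hfil, not_true, if_neg]
    rw [pvA_loop2_char s e hlen, pvA_loop3_char s e hlen]
    -- counts of the two strings agree for each of 'R', 'L'
    have hcnt_eq : ∀ c0 : Char, pvIsRL c0 = true →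
        s.countP (fun c => c == c0) = e.countP (fun c => c == c0) := by
      intro c0 hc0
      have hs : s.countP (fun c => c == c0) = (s.filter pvIsRL).countP (fun c => c == c0) := by
        rw [List.countP_filter]
        apply List.countP_congr
        intro c _
        by_cases hcc : (c == c0) = true
        · have : pvIsRL c = true := by have := beq_iff_eq.mp hcc; subst this; exact hc0
          simp [hcc, this]
        · simp [hcc]
      have he : e.countP (fun c => c == c0) = (e.filter pvIsRL).countP (fun c => c == c0) := by
        rw [List.countP_filter]
        apply List.countP_congr
        intro c _
        by_cases hcc : (c == c0) = true
        · have : pvIsRL c = true := by have := beq_iff_eq.mp hcc; subst this; exact hc0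
          simp [hcc, this]
        · simp [hcc]
      rw [hs, he, hfil]
    have hlenR : (pvPos 'R' (pvAnn s 0)).length = (pvPos 'R' (pvAnn e 0)).length := by
      rw [pvPos_len 'R' (by decide) s 0, pvPos_len 'R' (by decide) e 0]
      exact hcnt_eq 'R' (by decide)
    have hlenL : (pvPos 'L' (pvAnn s 0)).length = (pvPos 'L' (pvAnn e 0)).length := by
      rw [pvPos_len 'L' (by decide) s 0, pvPos_len 'L' (by decide) e 0]
      exact hcnt_eq 'L' (by decide)
    -- loop2 characterisation
    have h2 : (pvStk 'R' (pvTriples s e 0) []).isSome = true ↔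
        List.Forall₂ (· ≤ ·) (pvPos 'R' (pvAnn s 0)) (pvPos 'R' (pvAnn e 0)) := by
      rw [pvStk_isSome]
      have hstep : ∀ m : Nat,
          ((pvTriples s e 0).take m).countP (fun x => x.2.1 == 'R') =
            (e.take m).countP (fun c => c == 'R') ∧
          ((pvTriples s e 0).take m).countP (fun x => x.1 == 'R') =
            (s.take m).countP (fun c => c == 'R') := by
        intro m
        rw [pvTriples_take m s e 0]
        constructor
        · exact pvTriples_countS 'R' (s.take m) (e.take m) 0 (by simp [List.length_take]; omega)
        · exact pvTriples_countF 'R' (s.take m) (e.take m) 0 (by simp [List.length_take]; omega)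
      rw [← pvCrux _ _ (pvPos_sorted 'R' s 0) (pvPos_sorted 'R' e 0) hlenR]
      constructor
      · intro H M
        by_cases hM : 0 < M
        · have := H M.toNat
          rw [(hstep M.toNat).1, (hstep M.toNat).2] at this
          rw [pvCnt_take_pos 'R' (by decide) s 0 M.toNat,
              pvCnt_take_pos 'R' (by decide) e 0 M.toNat] at this
          have hMM : (0 : Int) + (M.toNat : Int) = M := by omega
          rw [hMM] at this
          simpa using this
        · have hz : ∀ (l : List Char), (pvPos 'R' (pvAnn l 0)).countP (fun p => decide (p < M)) = 0 := by
            intro l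
            rw [List.countP_eq_zero]
            intro p hp
            have := pvPos_bounds 'R' l 0 p hp
            simp
            omega
          rw [hz s, hz e]
      · intro H m
        have := H ((0 : Int) + (m : Nat))
        rw [← pvCnt_take_pos 'R' (by decide) s 0 m, ← pvCnt_take_pos 'R' (by decide) e 0 m] at this
        rw [(hstep m).1, (hstep m).2]
        simpa using this
    -- loop3 characterisation
    have h3 : (pvStk 'L' ((pvTriples s e 0).reverse) []).isSome = true ↔
        List.Forall₂ (· ≥ ·) (pvPos 'L' (pvAnn s 0)) (pvPos 'L' (pvAnn e 0)) := by
      rw [pvStk_isSome]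
      have hlen3 : (pvTriples s e 0).length = s.length := pvTriples_length s e hlen 0
      have hstep : ∀ k : Nat,
          ((pvTriples s e 0).drop k).countP (fun x => x.2.1 == 'L') =
            (e.drop k).countP (fun c => c == 'L') ∧
          ((pvTriples s e 0).drop k).countP (fun x => x.1 == 'L') =
            (s.drop k).countP (fun c => c == 'L') := by
        intro k
        rw [pvTriples_drop k s e 0]
        constructor
        · exact pvTriples_countS 'L' (s.drop k) (e.drop k) _ (by simp [List.length_drop]; omega)
        · exact pvTriples_countF 'L' (s.drop k) (e.drop k) _ (by simp [List.length_drop]; omega)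
      -- prefix conditions on the reversed triples = suffix conditions on the strings
      have hrevcond : (∀ m : Nat, (((pvTriples s e 0).reverse).take m).countP (fun x => x.2.1 == 'L') ≤
            ([] : List Int).length + (((pvTriples s e 0).reverse).take m).countP (fun x => x.1 == 'L')) ↔
          (∀ k : Nat, (e.drop k).countP (fun c => c == 'L') ≤ (s.drop k).countP (fun c => c == 'L')) := by
        constructor
        · intro H k
          by_cases hk : k ≤ s.length
          · have := H (s.length - k)
            rw [List.take_reverse, List.countP_reverse, List.countP_reverse,
                pvTriples_length s e hlen 0] at this
            have hkk : s.length - (s.length - k) = k := by omega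
            rw [hkk, (hstep k).1, (hstep k).2] at this
            simpa using this
          · have hs0 : s.drop k = [] := List.drop_eq_nil_iff.mpr (by omega)
            have he0 : e.drop k = [] := List.drop_eq_nil_iff.mpr (by omega)
            rw [hs0, he0]
        · intro H m
          rw [List.take_reverse, List.countP_reverse, List.countP_reverse,
              (hstep ((pvTriples s e 0).length - m)).1,
              (hstep ((pvTriples s e 0).length - m)).2]
          simpa using H ((pvTriples s e 0).length - m)
      rw [hrevcond]
      -- suffix counts = position counts, then the order lemma
      rw [← pvCruxGe _ _ (pvPos_sorted 'L' s 0) (pvPos_sorted 'L' e 0) hlenL]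
      constructor
      · intro H M
        by_cases hM : 0 < M
        · have := H M.toNat
          rw [pvCnt_drop_pos 'L' (by decide) s M.toNat,
              pvCnt_drop_pos 'L' (by decide) e M.toNat] at this
          have hMM : ((M.toNat : Nat) : Int) = M := by omega
          rw [hMM] at this
          exact this
        · have hfull : ∀ (l : List Char), (pvPos 'L' (pvAnn l 0)).countP (fun p => decide (M ≤ p)) =
              (pvPos 'L' (pvAnn l 0)).length := by
            intro l
            rw [List.countP_eq_length]
            intro p hp
            have := pvPos_bounds 'L' l 0 p hp
            simp
            omega
          rw [hfull s, hfull e, hlenL]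
      · intro H k
        rw [pvCnt_drop_pos 'L' (by decide) s k, pvCnt_drop_pos 'L' (by decide) e k]
        exact H (k : Int)
    -- assemble the three pieces
    have hmap : (pvAnn s 0).map Prod.fst = (pvAnn e 0).map Prod.fst := by
      rw [pvAnn_fst s 0, pvAnn_fst e 0]; exact hfil
    rcases hs2 : pvStk 'R' (pvTriples s e 0) [] with _ | r2
    · rcases hchk : pvChk (pvAnn s 0) (pvAnn e 0) with _ | _
      · rfl
      · exfalso
        have hfa := ((pvChk_iff (pvAnn s 0) (pvAnn e 0) (pvAnn_RL s 0) (pvAnn_RL e 0)).mp hchk).2.1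
        have := h2.mpr hfa
        rw [hs2] at this
        simp at this
    · rcases hs3 : pvStk 'L' ((pvTriples s e 0).reverse) [] with _ | r3
      · rcases hchk : pvChk (pvAnn s 0) (pvAnn e 0) with _ | _
        · rfl
        · exfalso
          have hfa := ((pvChk_iff (pvAnn s 0) (pvAnn e 0) (pvAnn_RL s 0) (pvAnn_RL e 0)).mp hchk).2.2
          have := h3.mpr hfa
          rw [hs3] at this
          simp at this
      · symm
        apply (pvChk_iff (pvAnn s 0) (pvAnn e 0) (pvAnn_RL s 0) (pvAnn_RL e 0)).mpr
        refine ⟨hmap, h2.mp (by rw [hs2]; rfl), h3.mp (by rw [hs3]; rfl)⟩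


-- ===== VERDICT (by name: the statement is the Claim_ definition above) =====
theorem canTransform_2_spec : Claim_equal_canTransform_2 := by
  intro start end_ _ hpre
  unfold Spec_canTransform_2 canTransform_2 canTransform_2_alt
  unfold Pre_canTransform_2 at hpre
  have h0 : ((start.toList.length : Int) - 0).toNat = start.toList.length := by omega
  rw [pvGo_eq_chk start.toList end_.toList 0 0 (start.toList.length : Int)
      (by exact_mod_cast Int.natCast_nonneg _) (by simpa using hpre)]
  rw [h0]
  have hmain := pvMain start.toList (end_.toList.take start.toList.length)
      (by rw [List.length_take]; omega)
  rw [← pvA_loop1_take start.toList end_.toList, ← pvA_loop2_take start.toList end_.toList,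
      ← pvA_loop3_take start.toList end_.toList] at hmain
  simpa using hmain
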